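-- pv_equiv track=rewrite | github.com/zerohoon0102/Algorithm | programmers/p42891.py | solution
-- ===== SOURCE A (Python) =====
-- from heapq import heappush, heappop
--
-- def solution(food_times, k):
--     if sum(food_times) <= k:
--         # 음식의 총 양보다 k가 같거나 크면 더 이상 먹을 음식이 없는 상황이 오게 됨.
--         return -1
--     rest_food_len = len(food_times)
--     foods_info = [True]*rest_food_len
--     times_asc_list = []
--     chk = {}
--     for idx, food_time in enumerate(food_times):
--         if food_time not in chk:
--             chk[food_time] = [idx]
--             heappush(times_asc_list, food_time)
--         else:
--             chk[food_time].append(idx)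
--
--     turn = 0
--     prev_time = 0
--     cur_time = 0
--     while turn <= k:
--         prev_time = cur_time
--         cur_time = heappop(times_asc_list)
--         diff = cur_time-prev_time
--
--         if diff*rest_food_len + turn < k:
--             # k가 가장 양이 적게 남은 음식을 지우기에 충분한 경우
--             ## 양이 가장 적게 남은 음식들을 지우고, turn을 증가시킴.
--             turn += rest_food_len*diff
--             rest_food_len -= len(chk[cur_time])
--             for idx in chk[cur_time]:
--                 foods_info[idx] = False
--         else:
--             # k가 가장 양이 적게 남은 음식을 지우기에 충분하지 않은 경우
--             # 남은 음식 중 어떤 음식이 다음에 먹을 음식인지 탐색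
--             rest_turn = k - turn
--             rest_turn %= rest_food_len
--             idx = 0
--             while 1:
--                 if foods_info[idx]:
--                     rest_turn -= 1
--                 idx += 1
--                 if rest_turn == -1:
--                     return idx
-- ===== SOURCE B (Python) =====
-- def solution(food_times, k):
--     if sum(food_times) <= k:
--         return -1
--     foods = sorted(((t, i + 1) for i, t in enumerate(food_times)), key=lambda p: p[0])
--     length = len(food_times)
--     prev = 0
--     turn = 0
--     pos = 0
--     while True:
--         t, _ = foods[pos]
--         spend = (t - prev) * length
--         if spend + turn < k:
--             turn += spend
--             length -= 1
--             prev = t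
--             pos += 1
--         else:
--             break
--     remaining = sorted(foods[pos:], key=lambda p: p[1])
--     return remaining[(k - turn) % length][1]
-- ===== Notes on version B (the rewrite author's own statement) =====
-- stated objective: simpler
-- what changed: Replaces the heap + time->indices dict + boolean alive-mask + linear scan with a single stable sort of (time, index) pairs walked with a prev/length arithmetic sweep, re-sorting the untouched tail by index for the final pick.
-- outside the precondition, e.g. on solution([0, 1], -1): A returns None, B returns 2
import Mathlib
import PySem

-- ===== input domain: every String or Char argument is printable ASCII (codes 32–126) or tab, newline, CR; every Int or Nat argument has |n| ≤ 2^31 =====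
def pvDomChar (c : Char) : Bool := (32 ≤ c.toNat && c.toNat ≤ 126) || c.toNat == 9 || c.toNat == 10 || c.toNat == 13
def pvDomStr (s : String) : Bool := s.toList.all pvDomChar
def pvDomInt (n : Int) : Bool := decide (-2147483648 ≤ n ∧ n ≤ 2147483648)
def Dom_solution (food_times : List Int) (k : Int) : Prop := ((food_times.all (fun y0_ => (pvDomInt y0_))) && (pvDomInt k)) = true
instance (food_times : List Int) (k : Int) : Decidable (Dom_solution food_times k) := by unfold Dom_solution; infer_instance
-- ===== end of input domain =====

-- B replaces A's heap + time→indices dict + alive-mask scan by one stable sort of (time, index)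
-- pairs walked arithmetically (objective: simpler).

-- ===== PORT A =====
-- heapq on a list of ints is modelled as a sorted-ascending list: heappush is an ordered
-- insert, heappop takes the head.  Exact here, because the list is only ever observed
-- through heappop, which returns the minimum.
def heapPush (heap : List Int) (t : Int) : List Int :=
  PySem.List.insertBy (fun a b => decide (a < b)) t heap

-- the inner 'idx = 0; while 1: …' scan over foods_info
def scanA : List Bool → Int → Int → Int
  | [], _, _ => 0  -- idx past the end: IndexError (unreachable: rest_turn < number of True flags)
  | b :: bs, r, i =>
    let r' := if b then r - 1 else r
    if r' = -1 then i + 1 else scanA bs r' (i + 1)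

-- the outer 'while turn <= k' loop; cur is cur_time (prev_time is recomputed from it)
def loopA (k : Int) (chk : PySem.Dict Int (List Int)) :
    List Int → Int → Int → Int → List Bool → Int
  | heap, turn, cur, restLen, info =>
    if turn ≤ k then
      match heap with
      | [] => 0  -- heappop of an empty heap: IndexError (outside Pre_solution)
      | c :: rest =>
        let diff := c - cur
        if diff * restLen + turn < k then
          let idxs := chk.getD c []  -- cur_time is always a key of chk, so no KeyError
          loopA k chk rest (turn + restLen * diff) c (restLen - PySem.List.len idxs)
            (idxs.foldl (fun fi i => fi.set i.toNat false) info)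
        else
          scanA info (PySem.Int.mod (k - turn) restLen) 0
    else 0  -- loop exits with turn > k: Python returns None (outside Pre_solution)

def solution (food_times : List Int) (k : Int) : Int :=
  if food_times.sum ≤ k then -1
  else
    let info : List Bool := List.replicate food_times.length true  -- [True]*len(food_times)
    let st := (PySem.List.enumerate food_times 0).foldl
      (fun (st : List Int × PySem.Dict Int (List Int)) p =>
        if st.2.contains p.2 = false then (heapPush st.1 p.2, st.2.insert p.2 [p.1])
        else (st.1, st.2.modify p.2 [] (· ++ [p.1])))
      ([], PySem.Dict.empty)
    loopA k st.2 st.1 0 0 (PySem.List.len food_times) info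

-- ===== PORT B =====
-- the 'while True: … pos += 1' walk over the sorted pair list (the suffix foods[pos:] is the argument)
def loopB (k : Int) : List (Int × Int) → Int → Int → Int → Int
  | [], _, _, _ => 0  -- foods[pos] past the end: IndexError (unreachable under Pre_solution)
  | q :: rest, prev, turn, length =>
    let spend := (q.1 - prev) * length
    if spend + turn < k then loopB k rest q.1 (turn + spend) (length - 1)
    else
      let remaining := PySem.List.sorted (q :: rest) (fun p => p.2) false
      match PySem.List.pyGet? remaining (PySem.Int.mod (k - turn) length) with
      | some p => p.2
      | none => 0  -- never: 0 ≤ (k-turn) % length < length = remaining.length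

def solution_alt (food_times : List Int) (k : Int) : Int :=
  if food_times.sum ≤ k then -1
  else
    let foods := PySem.List.sorted
      ((PySem.List.enumerate food_times 0).map (fun p => (p.2, p.1 + 1)))
      (fun p => p.1) false
    loopB k foods 0 0 (PySem.List.len food_times)

-- ===== PRECONDITION & SPEC =====
-- Pre_ excludes exactly the inputs where A returns no int: with k < 0 and sum(food_times) > k
-- the 'while turn <= k' loop never runs and A falls off the end returning None.
def Pre_solution (food_times : List Int) (k : Int) : Prop := 0 ≤ k ∨ food_times.sum ≤ k
instance (food_times : List Int) (k : Int) : Decidable (Pre_solution food_times k) := by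
  unfold Pre_solution; infer_instance
def pvWitness_solution : List Int × Int := ([3, 1, 2], 5)

def Spec_solution (food_times : List Int) (k : Int) (out : Int) : Prop := out = solution_alt food_times k
instance (food_times : List Int) (k : Int) (out : Int) : Decidable (Spec_solution food_times k out) := by unfold Spec_solution; infer_instance

-- ===== CLAIM (what is proved, stated in full; the proofs are below) =====
def Claim_equal_solution : Prop := ∀ (food_times : List Int) (k : Int), Dom_solution food_times k → Pre_solution food_times k → Spec_solution food_times k (solution food_times k)

-- ===== LEMMAS AND PROOFS =====

-- notation for the proofs: the (time, 1-based index) pair list, the sorted distinct times,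
-- the per-time group, the still-alive pairs, the alive mask
def pvE (ft : List Int) : List (Int × Int) :=
  (PySem.List.enumerate ft 0).map (fun p => (p.2, p.1 + 1))
def pvD (ft : List Int) : List Int :=
  PySem.List.sorted (PySem.Set.ofList ft) (fun x => x)
def pvGrp (ft : List Int) (c : Int) : List (Int × Int) :=
  (pvE ft).filter (fun q => q.1 == c)
def pvAlive (ft : List Int) (ds : List Int) : List (Int × Int) :=
  (pvE ft).filter (fun q => decide (q.1 ∈ ds))
def pvMask (ft : List Int) (ds : List Int) : List Bool :=
  ft.map (fun t => decide (t ∈ ds))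

theorem insertBy_sandwich {α : Type} (before : α → α → Bool) (x : α) :
    ∀ (A B : List α), (∀ y ∈ A, before x y = false) → (∀ y ∈ B, before x y = true) →
    PySem.List.insertBy before x (A ++ B) = A ++ x :: B := by
  intro A
  induction A with
  | nil =>
    intro B _ hB
    cases B with
    | nil => rfl
    | cons b bs => simp [PySem.List.insertBy, hB b (by simp)]
  | cons a A ih =>
    intro B hA hB
    simp only [List.cons_append, PySem.List.insertBy, hA a (by simp)]
    simp [ih B (fun y hy => hA y (by simp [hy])) hB]

theorem split3 (ds : List Int) (x : Int) (hp : ds.Pairwise (· < ·)) (hx : x ∈ ds) :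
    ds = ds.filter (fun c => decide (c < x)) ++ x :: ds.filter (fun c => decide (x < c)) := by
  induction ds with
  | nil => cases hx
  | cons d ds ih =>
    rcases List.pairwise_cons.mp hp with ⟨hd, hp'⟩
    rcases List.mem_cons.mp hx with h | h
    · subst h
      have h1 : ds.filter (fun c => decide (c < x)) = [] :=
        List.filter_eq_nil_iff.mpr (by intro c hc; simpa using not_lt.mpr (le_of_lt (hd c hc)))
      have h2 : ds.filter (fun c => decide (x < c)) = ds :=
        List.filter_eq_self.mpr (by intro c hc; simpa using hd c hc)
      simp [h1, h2]
    · have hdx : d < x := hd x h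
      have := ih hp' h
      simp only [List.filter_cons,
        show (decide (d < x)) = true from by simpa using hdx,
        show (decide (x < d)) = false from by simpa using not_lt.mpr (le_of_lt hdx)]
      simpa using this

theorem flatMap_filter_of_empty {α β : Type} (ds : List α) (q : α → Bool) (f : α → List β)
    (h : ∀ c ∈ ds, q c = false → f c = []) :
    (ds.filter q).flatMap f = ds.flatMap f := by
  induction ds with
  | nil => rfl
  | cons c ds ih =>
    have ih' := ih (fun c hc => h c (by simp [hc]))
    by_cases hq : q c = true
    · simp [hq, ih']
    · simp only [Bool.not_eq_true] at hq
      simp [hq, ih', h c (by simp) hq]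

theorem sorted_fst_grouped : ∀ (l : List (Int × Int)) (ds : List Int),
    ds.Pairwise (· < ·) → (∀ c, c ∈ ds ↔ c ∈ l.map (·.1)) →
    PySem.List.sorted l (fun p => p.1) = ds.flatMap (fun c => l.filter (fun q => q.1 == c)) := by
  intro l
  induction l using List.reverseRecOn with
  | nil =>
    intro ds _ hcov
    have : ds = [] := List.eq_nil_iff_forall_not_mem.mpr (fun c hc => by simpa using (hcov c).mp hc)
    simp [this, PySem.List.sorted]
  | append_singleton l p ih =>
    intro ds hp hcov
    have hx : p.1 ∈ ds := (hcov p.1).mpr (by simp)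
    have hsplit := split3 ds p.1 hp hx
    set dsLt := ds.filter (fun c => decide (c < p.1)) with hdsLt
    set dsGt := ds.filter (fun c => decide (p.1 < c)) with hdsGt
    have hmemLt : ∀ c ∈ dsLt, c < p.1 := fun c hc => by
      simpa using (List.mem_filter.mp hc).2
    have hmemGt : ∀ c ∈ dsGt, p.1 < c := fun c hc => by
      simpa using (List.mem_filter.mp hc).2
    -- the old groups
    have hstep : PySem.List.sorted (l ++ [p]) (fun q => q.1)
        = PySem.List.insertBy (fun a b => decide (a.1 < b.1)) p (PySem.List.sorted l (fun q => q.1)) := by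
      rw [PySem.List.sorted_eq_foldl_insertBy, PySem.List.sorted_eq_foldl_insertBy, List.foldl_append]
      rfl
    have hds' : ∀ c, c ∈ ds.filter (fun c => decide (c ∈ l.map (·.1))) ↔ c ∈ l.map (·.1) := by
      intro c
      constructor
      · intro hc; simpa using (List.mem_filter.mp hc).2
      · intro hc
        exact List.mem_filter.mpr ⟨(hcov c).mpr (by simp [hc]), by simpa using hc⟩
    have hih := ih (ds.filter (fun c => decide (c ∈ l.map (·.1))))
      (hp.sublist List.filter_sublist) hds'
    have hdrop : (ds.filter (fun c => decide (c ∈ l.map (·.1)))).flatMap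
        (fun c => l.filter (fun q => q.1 == c)) = ds.flatMap (fun c => l.filter (fun q => q.1 == c)) := by
      apply flatMap_filter_of_empty
      intro c _ hc
      refine List.filter_eq_nil_iff.mpr ?_
      intro q hq hqc
      have : c ∈ l.map (·.1) := by
        refine List.mem_map.mpr ⟨q, hq, ?_⟩
        simpa using hqc
      simp [this] at hc
    have hold : ds.flatMap (fun c => l.filter (fun q => q.1 == c))
        = (dsLt.flatMap (fun c => l.filter (fun q => q.1 == c)) ++ l.filter (fun q => q.1 == p.1))
          ++ dsGt.flatMap (fun c => l.filter (fun q => q.1 == c)) := by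
      conv_lhs => rw [hsplit]
      simp [List.flatMap_append, List.append_assoc]
    have hins : PySem.List.insertBy (fun a b => decide (a.1 < b.1)) p
        ((dsLt.flatMap (fun c => l.filter (fun q => q.1 == c)) ++ l.filter (fun q => q.1 == p.1))
          ++ dsGt.flatMap (fun c => l.filter (fun q => q.1 == c)))
        = (dsLt.flatMap (fun c => l.filter (fun q => q.1 == c)) ++ l.filter (fun q => q.1 == p.1))
          ++ p :: dsGt.flatMap (fun c => l.filter (fun q => q.1 == c)) := by
      apply insertBy_sandwich
      · intro y hy
        rcases List.mem_append.mp hy with hy | hy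
        · rcases List.mem_flatMap.mp hy with ⟨c, hc, hyc⟩
          have : y.1 = c := by simpa using (List.mem_filter.mp hyc).2
          simp [this, not_lt.mpr (le_of_lt (hmemLt c hc))]
        · have : y.1 = p.1 := by simpa using (List.mem_filter.mp hy).2
          simp [this]
      · intro y hy
        rcases List.mem_flatMap.mp hy with ⟨c, hc, hyc⟩
        have : y.1 = c := by simpa using (List.mem_filter.mp hyc).2
        simp [this, hmemGt c hc]
    have hnew : ds.flatMap (fun c => (l ++ [p]).filter (fun q => q.1 == c))
        = (dsLt.flatMap (fun c => l.filter (fun q => q.1 == c)) ++ l.filter (fun q => q.1 == p.1))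
          ++ p :: dsGt.flatMap (fun c => l.filter (fun q => q.1 == c)) := by
      conv_lhs => rw [hsplit]
      have hfx : (l ++ [p]).filter (fun q => q.1 == p.1) = l.filter (fun q => q.1 == p.1) ++ [p] := by
        simp [List.filter_append]
      have hLt : dsLt.flatMap (fun c => (l ++ [p]).filter (fun q => q.1 == c))
          = dsLt.flatMap (fun c => l.filter (fun q => q.1 == c)) :=
        List.flatMap_congr (fun c hc => by
          simp [List.filter_append, (ne_of_lt (hmemLt c hc)).symm])
      have hGt : dsGt.flatMap (fun c => (l ++ [p]).filter (fun q => q.1 == c))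
          = dsGt.flatMap (fun c => l.filter (fun q => q.1 == c)) :=
        List.flatMap_congr (fun c hc => by
          simp [List.filter_append, ne_of_lt (hmemGt c hc)])
      rw [List.flatMap_append, List.flatMap_cons, hLt, hGt, hfx]
      simp [List.append_assoc]
    rw [hstep, hih, hdrop, hold, hins, hnew]

theorem dict_insert_modify (d : PySem.Dict Int (List Int)) (t i : Int)
    (h : d.contains t = false) : d.insert t [i] = d.modify t [] (· ++ [i]) := by
  simp [PySem.Dict.insert, PySem.Dict.modify, h, PySem.Dict.getD_of_not_contains d [] h]

theorem build_snd : ∀ (l : List (Int × Int)) (h : List Int) (d : PySem.Dict Int (List Int)),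
    (l.foldl (fun (st : List Int × PySem.Dict Int (List Int)) p =>
        if st.2.contains p.2 = false then (heapPush st.1 p.2, st.2.insert p.2 [p.1])
        else (st.1, st.2.modify p.2 [] (· ++ [p.1]))) (h, d)).2
      = l.foldl (fun d p => d.modify p.2 [] (· ++ [p.1])) d := by
  intro l
  induction l with
  | nil => intro h d; rfl
  | cons p l ih =>
    intro h d
    by_cases hc : d.contains p.2 = false
    · simp only [List.foldl_cons, if_pos hc, ih, dict_insert_modify d p.2 p.1 hc]
    · simp only [List.foldl_cons, if_neg hc, ih]

theorem insertBy_perm (x : Int) : ∀ (ys : List Int),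
    (PySem.List.insertBy (fun a b => decide (a < b)) x ys).Perm (x :: ys) := by
  intro ys
  induction ys with
  | nil => simp [PySem.List.insertBy]
  | cons y ys ih =>
    by_cases h : x < y
    · simp [PySem.List.insertBy, h]
    · simp only [PySem.List.insertBy, decide_eq_true_eq, if_neg h]
      exact ((ih.cons y).trans (List.Perm.swap x y ys))

theorem insertBy_pairwise_lt (x : Int) : ∀ (ys : List Int), ys.Pairwise (· < ·) → x ∉ ys →
    (PySem.List.insertBy (fun a b => decide (a < b)) x ys).Pairwise (· < ·) := by
  intro ys
  induction ys with
  | nil => intro _ _; simp [PySem.List.insertBy]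
  | cons y ys ih =>
    intro hp hx
    rcases List.pairwise_cons.mp hp with ⟨hy, hp'⟩
    by_cases h : x < y
    · simp only [PySem.List.insertBy, decide_eq_true_eq, if_pos h]
      exact List.pairwise_cons.mpr ⟨by
        intro b hb
        rcases List.mem_cons.mp hb with rfl | hb
        · exact h
        · exact lt_trans h (hy b hb), hp⟩
    · have hxy : y < x := lt_of_le_of_ne (not_lt.mp h) (by rintro rfl; exact hx (by simp))
      simp only [PySem.List.insertBy, decide_eq_true_eq, if_neg h]
      refine List.pairwise_cons.mpr ⟨?_, ih hp' (fun hm => hx (by simp [hm]))⟩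
      intro b hb
      rcases List.mem_cons.mp ((List.Perm.mem_iff (insertBy_perm x ys)).mp hb) with rfl | hb
      · exact hxy
      · exact hy b hb

theorem build_fst : ∀ (l : List (Int × Int)) (h : List Int) (d : PySem.Dict Int (List Int)),
    h.Pairwise (· < ·) → h.Perm d.keys → d.keys.Nodup →
    (l.foldl (fun (st : List Int × PySem.Dict Int (List Int)) p =>
        if st.2.contains p.2 = false then (heapPush st.1 p.2, st.2.insert p.2 [p.1])
        else (st.1, st.2.modify p.2 [] (· ++ [p.1]))) (h, d)).1.Pairwise (· < ·) ∧
    (l.foldl (fun (st : List Int × PySem.Dict Int (List Int)) p =>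
        if st.2.contains p.2 = false then (heapPush st.1 p.2, st.2.insert p.2 [p.1])
        else (st.1, st.2.modify p.2 [] (· ++ [p.1]))) (h, d)).1.Perm
      (l.foldl (fun (st : List Int × PySem.Dict Int (List Int)) p =>
        if st.2.contains p.2 = false then (heapPush st.1 p.2, st.2.insert p.2 [p.1])
        else (st.1, st.2.modify p.2 [] (· ++ [p.1]))) (h, d)).2.keys := by
  intro l
  induction l with
  | nil => intro h d h1 h2 _; exact ⟨h1, h2⟩
  | cons p l ih =>
    intro h d h1 h2 hnd
    by_cases hc : d.contains p.2 = false
    · have hxh : p.2 ∉ h := fun hm => by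
        have := (h2.mem_iff).mp hm
        rw [← PySem.Dict.contains_iff_mem_keys] at this
        simp [hc] at this
      have hk : (d.insert p.2 [p.1]).keys = d.keys ++ [p.2] :=
        PySem.Dict.keys_insert_of_not_contains d [p.1] hc
      simp only [List.foldl_cons, if_pos hc]
      refine ih (heapPush h p.2) (d.insert p.2 [p.1])
        (insertBy_pairwise_lt p.2 h h1 hxh) ?_ ?_
      · refine (insertBy_perm p.2 h).trans ?_
        rw [hk]
        exact (h2.cons p.2).trans (List.perm_append_singleton p.2 d.keys).symm
      · exact PySem.Dict.nodup_keys_insert d p.2 [p.1] hnd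
    · have hk : (d.modify p.2 [] (· ++ [p.1])).keys = d.keys := by
        rw [PySem.Dict.keys_modify, PySem.Dict.keys_insert_of_contains]
        simpa using hc
      simp only [List.foldl_cons, if_neg hc]
      refine ih h (d.modify p.2 [] (· ++ [p.1])) h1 (by rw [hk]; exact h2) (by rw [hk]; exact hnd)

theorem set_fold_getElem? : ∀ (is : List Int) (m : List Bool) (j : Nat),
    (is.foldl (fun fi i => fi.set i.toNat false) m)[j]?
      = if ∃ i ∈ is, i.toNat = j then (m[j]?.map fun _ => false) else m[j]? := by
  intro is
  induction is with
  | nil => simp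
  | cons i is ih =>
    intro m j
    simp only [List.foldl_cons, ih]
    by_cases hj : i.toNat = j
    · subst hj
      have hall : ∃ i' ∈ i :: is, i'.toNat = i.toNat := ⟨i, by simp, rfl⟩
      have hset : ∀ (P : Prop) [Decidable P],
          (if P then ((m.set i.toNat false)[i.toNat]?.map fun _ => false)
            else (m.set i.toNat false)[i.toNat]?) = (m[i.toNat]?.map fun _ => false) := by
        intro P _
        rw [List.getElem?_set]
        by_cases hlt : i.toNat < m.length
        · simp [hlt]
        · simp [le_of_not_gt hlt]
      rw [hset, if_pos hall]
    · by_cases hmem : ∃ i' ∈ is, i'.toNat = j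
      · have : ∃ i' ∈ i :: is, i'.toNat = j := by
          rcases hmem with ⟨i', h1, h2⟩; exact ⟨i', by simp [h1], h2⟩
        simp only [if_pos hmem, if_pos this]
        rw [List.getElem?_set, if_neg hj]
      · have hno : ¬∃ i' ∈ i :: is, i'.toNat = j := by
          rintro ⟨i', h1, h2⟩
          rcases List.mem_cons.mp h1 with rfl | h1
          · exact hj h2
          · exact hmem ⟨i', h1, h2⟩
        simp only [if_neg hmem, if_neg hno]
        rw [List.getElem?_set, if_neg hj]

theorem mask_update (ft : List Int) (c : Int) (ds : List Int) (hc : c ∉ ds) :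
    ((((PySem.List.enumerate ft 0).filter (fun p => p.2 == c)).map (·.1)).foldl
        (fun fi i => fi.set i.toNat false) (pvMask ft (c :: ds))) = pvMask ft ds := by
  apply List.ext_getElem?
  intro j
  rw [set_fold_getElem?]
  have hmm : (∃ i ∈ ((PySem.List.enumerate ft 0).filter (fun p => p.2 == c)).map (·.1), i.toNat = j)
      ↔ ∃ (hj : j < ft.length), ft[j] = c := by
    constructor
    · rintro ⟨i, hi, rfl⟩
      rcases List.mem_map.mp hi with ⟨p, hp, rfl⟩
      rcases List.mem_filter.mp hp with ⟨hpmem, hpc⟩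
      rcases (PySem.List.mem_enumerate_iff _ _ _).mp hpmem with ⟨kn, hk, rfl⟩
      refine ⟨by simpa using hk, ?_⟩
      simp only [zero_add] at *
      simpa using hpc
    · rintro ⟨hj, hfc⟩
      refine ⟨(j : Int), List.mem_map.mpr ⟨((j : Int), ft[j]), ?_, rfl⟩, by simp⟩
      refine List.mem_filter.mpr ⟨?_, by simpa using hfc⟩
      exact (PySem.List.mem_enumerate_iff _ _ _).mpr ⟨j, hj, by simp⟩
  by_cases hj : j < ft.length
  · have hget : (pvMask ft (c :: ds))[j]? = some (decide (ft[j] ∈ c :: ds)) := by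
      simp [pvMask, List.getElem?_map, List.getElem?_eq_getElem hj]
    have hget' : (pvMask ft ds)[j]? = some (decide (ft[j] ∈ ds)) := by
      simp [pvMask, List.getElem?_map, List.getElem?_eq_getElem hj]
    by_cases hfc : ft[j] = c
    · rw [if_pos (hmm.mpr ⟨hj, hfc⟩), hget, hget']
      simp [hfc, hc]
    · have : ¬∃ i ∈ ((PySem.List.enumerate ft 0).filter (fun p => p.2 == c)).map (·.1), i.toNat = j := by
        intro h; rcases hmm.mp h with ⟨_, h2⟩; exact hfc h2
      rw [if_neg this, hget, hget']
      simp [List.mem_cons, hfc]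
  · have h1 : (pvMask ft (c :: ds))[j]? = none := by
      simp [pvMask]; omega
    have h2 : (pvMask ft ds)[j]? = none := by
      simp [pvMask]; omega
    rw [h1, h2]
    simp

theorem scan_spec : ∀ (ft : List Int) (ds : List Int) (r i : Int) (v : Int × Int), 0 ≤ r →
    ((PySem.List.enumerate ft i).filter (fun p => decide (p.2 ∈ ds)))[r.toNat]? = some v →
    scanA (ft.map (fun t => decide (t ∈ ds))) r i = v.1 + 1 := by
  intro ft
  induction ft with
  | nil => intro ds r i v _ hv; simp [PySem.List.enumerate_nil] at hv
  | cons t ft ih =>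
    intro ds r i v hr0 hv
    rw [PySem.List.enumerate_cons] at hv
    by_cases hb : t ∈ ds
    · rw [List.filter_cons_of_pos (by simpa using hb)] at hv
      by_cases hz : r = 0
      · subst hz
        simp only [Int.toNat_zero, List.getElem?_cons_zero, Option.some.injEq] at hv
        simp [scanA, hb, ← hv]
      · have hpos : 0 < r := lt_of_le_of_ne hr0 (Ne.symm hz)
        have hstep : scanA (List.map (fun t => decide (t ∈ ds)) (t :: ft)) r i
            = scanA (ft.map (fun t => decide (t ∈ ds))) (r - 1) (i + 1) := by
          simp only [List.map_cons, scanA, hb, decide_true, if_true]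
          rw [if_neg (show ¬(r - 1 = -1) by omega)]
        have htn : r.toNat = (r - 1).toNat + 1 := by omega
        rw [htn, List.getElem?_cons_succ] at hv
        rw [hstep, ih ds (r - 1) (i + 1) v (by omega) hv]
    · rw [List.filter_cons_of_neg (by simpa using hb)] at hv
      have hstep : scanA (List.map (fun t => decide (t ∈ ds)) (t :: ft)) r i
          = scanA (ft.map (fun t => decide (t ∈ ds))) r (i + 1) := by
        simp only [List.map_cons, scanA, hb, decide_false, Bool.false_eq_true, if_false]
        rw [if_neg (show ¬(r = -1) by omega)]
      rw [hstep, ih ds r (i + 1) v hr0 hv]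

theorem filter_mem_cons_perm (c : Int) (ds : List Int) (hc : c ∉ ds) : ∀ (l : List (Int × Int)),
    (l.filter (fun q => decide (q.1 ∈ c :: ds))).Perm
      (l.filter (fun q => q.1 == c) ++ l.filter (fun q => decide (q.1 ∈ ds))) := by
  intro l
  induction l with
  | nil => simp
  | cons q l ih =>
    by_cases h1 : q.1 = c
    · rw [List.filter_cons_of_pos (by simp [h1]), List.filter_cons_of_pos (by simp [h1]),
        List.filter_cons_of_neg (by simp [h1, hc])]
      exact ih.cons q
    · by_cases h2 : q.1 ∈ ds
      · rw [List.filter_cons_of_pos (by simp [h2]), List.filter_cons_of_neg (by simp [h1]),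
          List.filter_cons_of_pos (by simp [h2])]
        exact (ih.cons q).trans (List.perm_middle).symm
      · rw [List.filter_cons_of_neg (by simp [h1, h2]), List.filter_cons_of_neg (by simp [h1]),
          List.filter_cons_of_neg (by simp [h2])]
        exact ih

theorem alive_perm (ft : List Int) : ∀ (ds : List Int), ds.Nodup →
    ((ds.flatMap (fun c => pvGrp ft c)).Perm (pvAlive ft ds)) := by
  intro ds
  induction ds with
  | nil => simp [pvAlive]
  | cons c ds ih =>
    intro hnd
    rcases List.nodup_cons.mp hnd with ⟨hc, hnd'⟩
    rw [List.flatMap_cons]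
    refine (List.Perm.append_left _ (ih hnd')).trans ?_
    exact (filter_mem_cons_perm c ds hc (pvE ft)).symm

theorem alive_pairwise_snd (ft : List Int) (ds : List Int) :
    (pvAlive ft ds).Pairwise (fun a b => a.2 < b.2) := by
  have h1 : (pvE ft).Pairwise (fun a b => a.2 < b.2) := by
    apply List.Pairwise.map (f := fun p : Int × Int => (p.2, p.1 + 1))
      (S := fun a b => a.2 < b.2) (R := fun p q : Int × Int => p.1 < q.1)
    · intro a b h; simpa using h
    · exact PySem.List.pairwise_lt_enumerate ft 0
  exact h1.sublist List.filter_sublist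

theorem grp_map (ft : List Int) (c : Int) :
    pvGrp ft c = ((PySem.List.enumerate ft 0).filter (fun p => p.2 == c)).map
      (fun p => (p.2, p.1 + 1)) := by
  rw [pvGrp, pvE, List.filter_map]; rfl

theorem alive_map (ft : List Int) (ds : List Int) :
    pvAlive ft ds = ((PySem.List.enumerate ft 0).filter (fun p => decide (p.2 ∈ ds))).map
      (fun p => (p.2, p.1 + 1)) := by
  rw [pvAlive, pvE, List.filter_map]; rfl

theorem loopB_zero (k : Int) : ∀ (g rest : List (Int × Int)) (prev turn L : Int),
    (∀ q ∈ g, q.1 = prev) → turn < k →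
    loopB k (g ++ rest) prev turn L = loopB k rest prev turn (L - g.length) := by
  intro g
  induction g with
  | nil => intro rest prev turn L _ _; simp
  | cons q g ih =>
    intro rest prev turn L hall hk
    have hq : q.1 = prev := hall q (by simp)
    have hstep : loopB k ((q :: g) ++ rest) prev turn L = loopB k (g ++ rest) prev turn (L - 1) := by
      simp only [List.cons_append, loopB, hq, sub_self, zero_mul, zero_add, add_zero, if_pos hk]
    rw [hstep, ih rest prev turn (L - 1) (fun q hq => hall q (by simp [hq])) hk]
    congr 1
    simp only [List.length_cons]
    push_cast
    ring

theorem loopB_group (k c : Int) (g rest : List (Int × Int)) (prev turn L : Int)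
    (hg : g ≠ []) (hall : ∀ q ∈ g, q.1 = c) (hcond : (c - prev) * L + turn < k) :
    loopB k (g ++ rest) prev turn L = loopB k rest c (turn + (c - prev) * L) (L - g.length) := by
  cases g with
  | nil => exact absurd rfl hg
  | cons q g =>
    have hq : q.1 = c := hall q (by simp)
    have hstep : loopB k ((q :: g) ++ rest) prev turn L
        = loopB k (g ++ rest) c (turn + (c - prev) * L) (L - 1) := by
      simp only [List.cons_append, loopB, hq]
      rw [if_pos (by omega : (c - prev) * L + turn < k)]
    rw [hstep, loopB_zero k g rest c (turn + (c - prev) * L) (L - 1)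
      (fun q hq => hall q (by simp [hq])) (by omega)]
    congr 1
    simp only [List.length_cons]
    push_cast
    ring

theorem loop_eq (ft : List Int) (k : Int) (chk : PySem.Dict Int (List Int))
    (Hchk : ∀ c, chk.getD c [] = ((PySem.List.enumerate ft 0).filter (fun p => p.2 == c)).map (·.1)) :
    ∀ (ds : List Int) (turn cur L : Int),
    ds.Pairwise (· < ·) → (∀ c ∈ ds, c ∈ ft) → turn ≤ k →
    L = ((pvAlive ft ds).length : Int) →
    loopA k chk ds turn cur L (pvMask ft ds)
      = loopB k (ds.flatMap (fun c => pvGrp ft c)) cur turn L := by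
  intro ds
  induction ds with
  | nil =>
    intro turn cur L _ _ hk _
    simp [loopA, loopB]
  | cons c ds ih =>
    intro turn cur L hp hsub hk hL
    rcases List.pairwise_cons.mp hp with ⟨hcds, hp'⟩
    have hcnotin : c ∉ ds := fun h => lt_irrefl c (hcds c h)
    have hcft : c ∈ ft := hsub c (by simp)
    have hallc : ∀ q ∈ pvGrp ft c, q.1 = c := by
      intro q hq
      simpa using (List.mem_filter.mp hq).2
    have hgne : pvGrp ft c ≠ [] := by
      obtain ⟨j, hj, hfj⟩ := List.mem_iff_getElem.mp hcft
      refine List.ne_nil_of_mem (a := (c, (j : Int) + 1)) ?_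
      refine List.mem_filter.mpr ⟨?_, by simp⟩
      refine List.mem_map.mpr ⟨((j : Int), c), ?_, rfl⟩
      exact (PySem.List.mem_enumerate_iff _ _ _).mpr ⟨j, hj, by simp [hfj]⟩
    have hsplit : (pvAlive ft (c :: ds)).Perm (pvGrp ft c ++ pvAlive ft ds) :=
      filter_mem_cons_perm c ds hcnotin (pvE ft)
    have hlen : (pvAlive ft (c :: ds)).length
        = (pvGrp ft c).length + (pvAlive ft ds).length := by
      rw [hsplit.length_eq]; simp
    have hgpos : 0 < (pvGrp ft c).length := List.length_pos_of_ne_nil hgne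
    have hLpos : 0 < L := by rw [hL]; exact_mod_cast by omega
    have hidxlen : PySem.List.len (chk.getD c []) = ((pvGrp ft c).length : Int) := by
      rw [PySem.List.len_eq, Hchk c, grp_map]
      simp
    have hAstep : loopA k chk (c :: ds) turn cur L (pvMask ft (c :: ds))
        = if (c - cur) * L + turn < k then
            loopA k chk ds (turn + L * (c - cur)) c (L - PySem.List.len (chk.getD c []))
              ((chk.getD c []).foldl (fun fi i => fi.set i.toNat false) (pvMask ft (c :: ds)))
          else scanA (pvMask ft (c :: ds)) (PySem.Int.mod (k - turn) L) 0 := by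
      simp only [loopA, if_pos hk]
    by_cases hcond : (c - cur) * L + turn < k
    · rw [hAstep, if_pos hcond, Hchk c, mask_update ft c ds hcnotin,
        List.flatMap_cons,
        loopB_group k c (pvGrp ft c) _ cur turn L hgne hallc hcond]
      have h1 : turn + L * (c - cur) = turn + (c - cur) * L := by ring
      have h2 : L - PySem.List.len (((PySem.List.enumerate ft 0).filter
            (fun p => p.2 == c)).map (·.1)) = L - ((pvGrp ft c).length : Int) := by
        rw [← Hchk c, hidxlen]
      rw [h1, h2]
      exact ih (turn + (c - cur) * L) c (L - ((pvGrp ft c).length : Int)) hp'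
        (fun x hx => hsub x (by simp [hx])) (by omega)
        (by rw [hL]; push_cast [hlen]; ring)
    · rw [hAstep, if_neg hcond]
      obtain ⟨q, gt, hg⟩ : ∃ q gt, pvGrp ft c = q :: gt := by
        cases hgg : pvGrp ft c with
        | nil => exact absurd hgg hgne
        | cons q gt => exact ⟨q, gt, rfl⟩
      set r := PySem.Int.mod (k - turn) L with hr
      have hr0 : 0 ≤ r := PySem.Int.mod_nonneg _ hLpos
      have hrlt : r < L := PySem.Int.mod_lt _ hLpos
      have hrn : r.toNat < ((PySem.List.enumerate ft 0).filter
          (fun p => decide (p.2 ∈ c :: ds))).length := by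
        have h1 : (pvAlive ft (c :: ds)).length = ((PySem.List.enumerate ft 0).filter
            (fun p => decide (p.2 ∈ c :: ds))).length := by
          rw [alive_map]; simp
        omega
      have hw := List.getElem?_eq_getElem hrn
      set w := ((PySem.List.enumerate ft 0).filter (fun p => decide (p.2 ∈ c :: ds)))[r.toNat]
      have hscan := scan_spec ft (c :: ds) r 0 w hr0 hw
      have hBlist : pvGrp ft c ++ ds.flatMap (fun c => pvGrp ft c) = q :: (gt ++ ds.flatMap (fun c => pvGrp ft c)) := by
        rw [hg]; rfl
      have hq1 : q.1 = c := hallc q (by rw [hg]; simp)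
      have hnodup : (c :: ds).Nodup := (List.pairwise_cons.mpr ⟨hcds, hp'⟩).imp ne_of_lt
      have hsorted : PySem.List.sorted (q :: (gt ++ ds.flatMap (fun c => pvGrp ft c))) (fun p => p.2)
          = pvAlive ft (c :: ds) := by
        apply PySem.List.sorted_eq_of_perm_of_pairwise_lt
        · refine ((alive_perm ft (c :: ds) hnodup).symm.trans ?_)
          rw [List.flatMap_cons, hBlist]
        · exact alive_pairwise_snd ft (c :: ds)
      have hget : PySem.List.pyGet? (pvAlive ft (c :: ds)) r = some (w.2, w.1 + 1) := by
        rw [show r = ((r.toNat : Nat) : Int) from (Int.toNat_of_nonneg hr0).symm,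
          PySem.List.pyGet?_natCast, alive_map, List.getElem?_map, hw]
        rfl
      have hBstep : loopB k (q :: (gt ++ ds.flatMap (fun c => pvGrp ft c))) cur turn L
          = w.1 + 1 := by
        simp only [loopB, hq1]
        rw [if_neg (by omega : ¬((c - cur) * L + turn < k)), ← hr, hsorted, hget]
      rw [List.flatMap_cons, hBlist, hBstep]
      simpa only [pvMask] using hscan

theorem chk_spec (ft : List Int) : ∀ c,
    ((PySem.List.enumerate ft 0).foldl (fun d p => d.modify p.2 [] (· ++ [p.1]))
        PySem.Dict.empty).getD c []
      = ((PySem.List.enumerate ft 0).filter (fun p => p.2 == c)).map (·.1) := by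
  intro c
  have h1 : (PySem.List.enumerate ft 0).foldl (fun d p => d.modify p.2 [] (· ++ [p.1]))
        PySem.Dict.empty
      = ((PySem.List.enumerate ft 0).map (fun p => (p.2, p.1))).foldl
        (fun d p => d.modify p.1 [] (· ++ [p.2])) PySem.Dict.empty := by
    rw [List.foldl_map]
  rw [h1, PySem.Dict.getD_foldl_modify_append, List.filter_map, List.map_map]
  simp [PySem.Dict.getD_empty]
  rfl

theorem chk_keys (ft : List Int) :
    ((PySem.List.enumerate ft 0).foldl (fun d p => d.modify p.2 [] (· ++ [p.1]))
        PySem.Dict.empty).keys = PySem.Set.ofList ft := by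
  have h1 : (PySem.List.enumerate ft 0).foldl (fun d p => d.modify p.2 [] (· ++ [p.1]))
        PySem.Dict.empty
      = ((PySem.List.enumerate ft 0).map (fun p => (p.2, p.1))).foldl
        (fun d p => d.modify p.1 [] (· ++ [p.2])) PySem.Dict.empty := by
    rw [List.foldl_map]
  have h2 := PySem.Dict.keys_foldl_modify_key
    ((PySem.List.enumerate ft 0).map (fun p => (p.2, p.1))) (fun p : Int × Int => p.1)
    ([] : List Int) (fun _ p => (· ++ [p.2])) PySem.Dict.empty
  simp only [] at h2
  rw [h1, h2]
  rw [PySem.Dict.keys_empty, List.map_map, PySem.Set.ofList_eq_foldl]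
  have : (PySem.List.enumerate ft 0).map ((fun p : Int × Int => p.1) ∘ (fun p : Int × Int => (p.2, p.1)))
      = ft := PySem.List.map_snd_enumerate ft 0
  rw [this]
  rfl

-- ===== VERDICT (by name: the statement is the Claim_ definition above) =====
theorem solution_spec : Claim_equal_solution := by
  intro ft k _hdom hpre
  unfold Spec_solution
  by_cases hs : ft.sum ≤ k
  · simp [solution, solution_alt, hs]
  · have hk0 : 0 ≤ k := hpre.resolve_right hs
    simp only [solution, solution_alt, if_neg hs]
    have hsnd := build_snd (PySem.List.enumerate ft 0) [] PySem.Dict.empty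
    have hfst := build_fst (PySem.List.enumerate ft 0) [] PySem.Dict.empty
      List.Pairwise.nil (by rw [PySem.Dict.keys_empty]) (by rw [PySem.Dict.keys_empty]; exact List.nodup_nil)
    have hkeys : ((PySem.List.enumerate ft 0).foldl
        (fun (st : List Int × PySem.Dict Int (List Int)) p =>
          if st.2.contains p.2 = false then (heapPush st.1 p.2, st.2.insert p.2 [p.1])
          else (st.1, st.2.modify p.2 [] (· ++ [p.1]))) ([], PySem.Dict.empty)).2.keys
        = PySem.Set.ofList ft := by
      rw [hsnd, chk_keys]
    have hheap : ((PySem.List.enumerate ft 0).foldl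
        (fun (st : List Int × PySem.Dict Int (List Int)) p =>
          if st.2.contains p.2 = false then (heapPush st.1 p.2, st.2.insert p.2 [p.1])
          else (st.1, st.2.modify p.2 [] (· ++ [p.1]))) ([], PySem.Dict.empty)).1
        = pvD ft := by
      refine (PySem.List.sorted_eq_of_perm_of_pairwise_lt _ _ _ ?_ hfst.1).symm
      rw [← hkeys]
      exact hfst.2
    have hmask : List.replicate ft.length true = pvMask ft (pvD ft) := by
      refine (List.map_eq_replicate_iff.mpr ?_).symm
      intro t ht
      simp [pvD, PySem.List.mem_sorted, PySem.Set.mem_ofList, ht]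
    have halive : pvAlive ft (pvD ft) = pvE ft := by
      refine List.filter_eq_self.mpr ?_
      intro q hq
      rcases List.mem_map.mp hq with ⟨p, hp, rfl⟩
      rcases (PySem.List.mem_enumerate_iff _ _ _).mp hp with ⟨j, hj, rfl⟩
      simp [pvD, PySem.List.mem_sorted, PySem.Set.mem_ofList, List.getElem_mem hj]
    have hlen0 : PySem.List.len ft = ((pvAlive ft (pvD ft)).length : Int) := by
      rw [halive, PySem.List.len_eq, pvE]
      simp
    have hDp : (pvD ft).Pairwise (· < ·) := PySem.List.sorted_ofList_pairwise_lt ft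
    have hDsub : ∀ c ∈ pvD ft, c ∈ ft := by
      intro c hc
      rw [pvD, PySem.List.mem_sorted, PySem.Set.mem_ofList] at hc
      exact hc
    have hfoods : PySem.List.sorted (pvE ft) (fun p => p.1)
        = (pvD ft).flatMap (fun c => pvGrp ft c) := by
      refine sorted_fst_grouped (pvE ft) (pvD ft) hDp ?_
      intro c
      rw [pvD, PySem.List.mem_sorted, PySem.Set.mem_ofList, pvE, List.map_map]
      rw [show ((fun p : Int × Int => p.1) ∘ (fun p : Int × Int => (p.2, p.1 + 1)))
        = (fun p : Int × Int => p.2) from rfl, PySem.List.map_snd_enumerate]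
    rw [hsnd, hheap, hmask]
    rw [show PySem.List.len ft = ((pvAlive ft (pvD ft)).length : Int) from hlen0]
    rw [loop_eq ft k _ (chk_spec ft) (pvD ft) 0 0 _ hDp hDsub hk0 rfl]
    rw [show ((PySem.List.enumerate ft 0).map (fun p => (p.2, p.1 + 1))) = pvE ft from rfl,
      hfoods, ← hlen0]
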